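-- pv_equiv track=rewrite | github.com/juggler14/financial_university_python_1_hw | university_1_22.py | find_words_with_consonants
-- ===== SOURCE A (Python) =====
-- def find_words_with_consonants(text):
--     consonants = set('bcdfghjklmnpqrstvwxyzBCDFGHJKLMNPQRSTVWXYZ')
--     words = text.split()
--     result = []
--
--     for word in words:
--         count = 0
--         for char in word:
--             if char in consonants:
--                 count += 1
--                 if count >= 2:
--                     result.append(word.strip('.,:;!?()[]{}"\''))
--                     break
--             else:
--                 count = 0
--
--     return result
-- ===== SOURCE B (Python) =====
-- def find_words_with_consonants(text):
--     cons = 'bcdfghjklmnpqrstvwxyzBCDFGHJKLMNPQRSTVWXYZ'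
--
--     def mask(w):
--         return ''.join('C' if ch in cons else ' ' for ch in w)
--
--     return [w.strip('.,:;!?()[]{}"\'')
--             for w in text.split()
--             if 'CC' in mask(w)]
-- ===== Notes on version B (the rewrite author's own statement) =====
-- stated objective: alternative
-- what changed: Replaced A's per-word stateful consonant-run counter with a staged pipeline: each word is first mapped to a consonant/blank mask string, and the decision is delegated to a substring containment test for a double-consonant marker in that mask.
import Mathlib
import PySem

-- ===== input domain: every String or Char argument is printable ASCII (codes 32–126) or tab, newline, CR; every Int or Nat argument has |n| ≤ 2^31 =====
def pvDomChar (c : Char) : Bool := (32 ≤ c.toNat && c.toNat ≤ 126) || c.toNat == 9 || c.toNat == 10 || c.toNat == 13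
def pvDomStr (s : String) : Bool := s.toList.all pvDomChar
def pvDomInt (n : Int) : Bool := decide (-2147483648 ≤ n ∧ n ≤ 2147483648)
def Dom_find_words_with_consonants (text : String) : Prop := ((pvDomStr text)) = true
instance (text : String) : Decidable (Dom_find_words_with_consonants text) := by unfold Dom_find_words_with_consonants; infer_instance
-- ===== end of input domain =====

-- B replaces A's per-word consonant-run counter state machine with a staged pipeline
-- (map each word to a 'C'/' ' mask string, then a 'CC'-substring containment test); alternative decomposition.

-- ===== PORT A =====
-- inner 'for char in word' loop of A, carried state: count (reset on non-consonant);
-- returns true iff the loop breaks (i.e. the word gets appended)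
def pvInnerA (cons : PySem.Set Char) : List Char → Int → Bool
  | [], _ => false
  | c :: rest, count =>
    if PySem.Set.contains cons c then
      let count := count + 1
      if 2 ≤ count then true else pvInnerA cons rest count
    else pvInnerA cons rest 0

def find_words_with_consonants (text : String) : List String :=
  let consonants := PySem.Set.ofList "bcdfghjklmnpqrstvwxyzBCDFGHJKLMNPQRSTVWXYZ".toList
  let words := PySem.Str.split₀ text
  words.foldl
    (fun result word =>
      if pvInnerA consonants word.toList 0 then
        result ++ [PySem.Str.stripChars word ".,:;!?()[]{}\"'"]
      else result)
    []

-- ===== PORT B =====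
-- 'ch in cons' membership test of Source B (single char in the consonant string)
def pvConsB (c : Char) : Bool := "bcdfghjklmnpqrstvwxyzBCDFGHJKLMNPQRSTVWXYZ".toList.contains c

-- one character of mask(w): 'C' if ch in cons else ' '
def pvMaskChar (c : Char) : Char := if pvConsB c then 'C' else ' '

-- Source B: [w.strip(...) for w in text.split() if 'CC' in mask(w)]
def find_words_with_consonants_alt (text : String) : List String :=
  (((PySem.Str.split₀ text).filter
      (fun w => PySem.Chars.isIn ['C', 'C'] (w.toList.map pvMaskChar))).map
    (fun w => PySem.Str.stripChars w ".,:;!?()[]{}\"'"))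

-- ===== PRECONDITION & SPEC =====
def Spec_find_words_with_consonants (text : String) (out : List String) : Prop := out = find_words_with_consonants_alt text
instance (text : String) (out : List String) : Decidable (Spec_find_words_with_consonants text out) := by unfold Spec_find_words_with_consonants; infer_instance

-- ===== CLAIM (what is proved, stated in full; the proofs are below) =====
def Claim_equal_find_words_with_consonants : Prop := ∀ (text : String), Dom_find_words_with_consonants text → Spec_find_words_with_consonants text (find_words_with_consonants text)

-- ===== LEMMAS AND PROOFS =====
def pvConsSet : PySem.Set Char := PySem.Set.ofList "bcdfghjklmnpqrstvwxyzBCDFGHJKLMNPQRSTVWXYZ".toList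

-- 'some adjacent pair of consonants' — joint intermediate characterisation of both ports
def pvPairAny (l : List Char) : Bool := (l.zip l.tail).any (fun p => pvConsB p.1 && pvConsB p.2)

set_option maxRecDepth 4000 in
theorem pvConsSet_eq : pvConsSet = "bcdfghjklmnpqrstvwxyzBCDFGHJKLMNPQRSTVWXYZ".toList := by
  decide

theorem pvCons_eq (c : Char) : PySem.Set.contains pvConsSet c = pvConsB c := by
  rw [pvConsSet_eq]
  simp [PySem.Set.contains_eq_listContains, pvConsB]

theorem pvPairAny_cons (c : Char) (rest : List Char) :
    pvPairAny (c :: rest) =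
      ((match rest with
        | [] => false
        | d :: _ => pvConsB c && pvConsB d) || pvPairAny rest) := by
  cases rest with
  | nil => simp [pvPairAny]
  | cons d rs => simp [pvPairAny, List.any_cons]

-- characterisation of A's inner loop for the two reachable counter values
theorem pvInnerA_char (l : List Char) :
    pvInnerA pvConsSet l 0 = pvPairAny l ∧
    pvInnerA pvConsSet l 1 =
      ((match l with
        | [] => false
        | c :: _ => pvConsB c) || pvPairAny l) := by
  induction l with
  | nil => simp [pvInnerA, pvPairAny]
  | cons c rest ih =>
    obtain ⟨ih0, ih1⟩ := ih
    constructor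
    · rw [pvInnerA]
      rw [pvCons_eq]
      by_cases h : pvConsB c = true
      · simp only [h, if_true]
        norm_num
        rw [ih1, pvPairAny_cons]
        cases rest with
        | nil => simp [pvPairAny]
        | cons d rs => simp [h]
      · simp only [Bool.not_eq_true] at h
        simp only [h]
        rw [ih0, pvPairAny_cons]
        cases rest with
        | nil => simp
        | cons d rs => simp [h]
    · rw [pvInnerA]
      rw [pvCons_eq]
      by_cases h : pvConsB c = true
      · simp only [h, if_true]
        norm_num
      · simp only [Bool.not_eq_true] at h
        simp only [h]
        rw [ih0, pvPairAny_cons]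
        cases rest with
        | nil => simp
        | cons d rs => simp [h]

theorem pvMaskChar_eq_C (c : Char) : pvMaskChar c = 'C' ↔ pvConsB c = true := by
  unfold pvMaskChar
  by_cases h : pvConsB c = true <;> simp [h]

-- characterisation of B's test: 'CC' occurs in the mask iff some adjacent pair is two consonants
theorem pvMaskCC_iff (l : List Char) :
    ['C', 'C'] <:+: (l.map pvMaskChar) ↔ pvPairAny l = true := by
  induction l with
  | nil => simp [pvPairAny]
  | cons c rest ih =>
    rw [List.map_cons, List.infix_cons_iff, pvPairAny_cons]
    cases rest with
    | nil =>
      simp [pvPairAny, List.prefix_cons_iff]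
    | cons d rs =>
      rw [List.map_cons, List.cons_prefix_cons]
      rw [List.cons_prefix_cons]
      constructor
      · rintro (⟨hc, hd, -⟩ | h)
        · simp [(pvMaskChar_eq_C c).mp hc.symm, (pvMaskChar_eq_C d).mp hd.symm]
        · simp [ih.mp h]
      · intro h
        rcases Bool.or_eq_true_iff.mp h with h1 | h2
        · rcases Bool.and_eq_true_iff.mp h1 with ⟨hc, hd⟩
          exact Or.inl ⟨((pvMaskChar_eq_C c).mpr hc).symm, ((pvMaskChar_eq_C d).mpr hd).symm, by simp⟩
        · exact Or.inr (ih.mpr h2)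

theorem pvMaskCC_eq (l : List Char) :
    PySem.Chars.isIn ['C', 'C'] (l.map pvMaskChar) = pvPairAny l := by
  cases h : pvPairAny l with
  | true => exact (PySem.Chars.isIn_iff_infix _ _).mpr ((pvMaskCC_iff l).mpr h)
  | false =>
    apply (PySem.Chars.isIn_eq_false_iff _ _).mpr
    intro hinf
    rw [(pvMaskCC_iff l).mp hinf] at h
    exact Bool.true_eq_false.mp h

-- ===== VERDICT (by name: the statement is the Claim_ definition above) =====
theorem find_words_with_consonants_spec : Claim_equal_find_words_with_consonants := by
  intro text _
  unfold Spec_find_words_with_consonants find_words_with_consonants find_words_with_consonants_alt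
  rw [show PySem.Set.ofList "bcdfghjklmnpqrstvwxyzBCDFGHJKLMNPQRSTVWXYZ".toList = pvConsSet from rfl]
  rw [PySem.List.foldl_append_if]
  simp only [List.nil_append]
  congr 1
  apply List.filter_congr
  intro w _
  rw [(pvInnerA_char w.toList).1, pvMaskCC_eq]
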